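-- pv_equiv track=rewrite | github.com/ShotaMiwa/year1-research | src/evaluation/metrics.py | _boundaries_to_segments
-- ===== SOURCE A (Python) =====
-- from typing import List, Dict, Tuple
--
-- def _boundaries_to_segments(boundaries: List[int]) -> List[int]:
--     """
--     境界リストをセグメント長のリストに変換
--
--     Args:
--         boundaries: 境界リスト（0 or 1）
--
--     Returns:
--         セグメント長のリスト
--     """
--     segments = []
--     tmp = 0
--
--     for b in boundaries:
--         tmp += 1
--         if b == 1:
--             segments.append(tmp)
--             tmp = 0
--
--     # 最後のセグメント
--     if tmp > 0:
--         segments.append(tmp)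
--
--     return segments
-- ===== SOURCE B (Python) =====
-- from typing import List
--
-- def _boundaries_to_segments(boundaries: List[int]) -> List[int]:
--     # Gap-based re-implementation: collect boundary indices, emit gaps between them.
--     idx = [i for i, b in enumerate(boundaries) if b == 1]
--     if not idx:
--         return [len(boundaries)] if boundaries else []
--     res = [idx[0] + 1] + [j - i for i, j in zip(idx, idx[1:])]
--     tail = len(boundaries) - (idx[-1] + 1)
--     if tail > 0:
--         res.append(tail)
--     return res
-- ===== Notes on version B (the rewrite author's own statement) =====
-- stated objective: alternative
-- what changed: Replaced A's single pass with a running segment-length accumulator by a gap-based decomposition: collect the boundary indices first, then emit segment lengths as differences of consecutive indices plus a trailing remainder.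
import Mathlib
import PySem

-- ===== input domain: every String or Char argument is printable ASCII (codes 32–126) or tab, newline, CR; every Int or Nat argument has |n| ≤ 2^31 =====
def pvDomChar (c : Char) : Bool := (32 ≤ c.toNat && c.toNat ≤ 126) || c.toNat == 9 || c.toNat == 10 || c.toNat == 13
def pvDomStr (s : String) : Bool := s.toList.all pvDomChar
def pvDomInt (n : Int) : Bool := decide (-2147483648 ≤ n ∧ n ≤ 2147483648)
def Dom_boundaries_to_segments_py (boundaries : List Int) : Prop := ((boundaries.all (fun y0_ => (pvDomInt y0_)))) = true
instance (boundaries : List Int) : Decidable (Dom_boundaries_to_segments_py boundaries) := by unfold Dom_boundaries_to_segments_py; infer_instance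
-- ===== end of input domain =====

-- B replaces A's running-accumulator loop by a different decomposition: collect the
-- boundary indices once, then emit segment lengths as gaps between consecutive indices
-- (objective: alternative decomposition, same cost).

-- ===== PORT A =====
-- literal transliteration of A's accumulator loop
def boundaries_to_segments_py (boundaries : List Int) : List Int :=
  let st := boundaries.foldl
    (fun (st : List Int × Int) b =>
      let tmp := st.2 + 1
      if b == 1 then (st.1 ++ [tmp], 0) else (st.1, tmp))
    ([], 0)
  if st.2 > 0 then st.1 ++ [st.2] else st.1

-- ===== PORT B =====
-- literal transliteration of Source B: boundary indices, then gaps between them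
def boundaries_to_segments_py_alt (boundaries : List Int) : List Int :=
  let idx : List Int :=
    ((PySem.List.enumerate boundaries 0).filter (fun p => p.2 == 1)).map (fun p => p.1)
  match idx with
  | [] => if boundaries.length > 0 then [(boundaries.length : Int)] else []
  | i0 :: r =>
    let res := (i0 + 1) :: (((i0 :: r).zip (i0 :: r).tail).map (fun p => p.2 - p.1))
    let tail := (boundaries.length : Int) - ((i0 :: r).getLastD 0 + 1)
    if tail > 0 then res ++ [tail] else res

-- ===== PRECONDITION & SPEC =====
def Spec_boundaries_to_segments_py (boundaries : List Int) (out : List Int) : Prop := out = boundaries_to_segments_py_alt boundaries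
instance (boundaries : List Int) (out : List Int) : Decidable (Spec_boundaries_to_segments_py boundaries out) := by unfold Spec_boundaries_to_segments_py; infer_instance

-- ===== CLAIM (what is proved, stated in full; the proofs are below) =====
def Claim_equal_boundaries_to_segments_py : Prop := ∀ (boundaries : List Int), Dom_boundaries_to_segments_py boundaries → Spec_boundaries_to_segments_py boundaries (boundaries_to_segments_py boundaries)

-- ===== LEMMAS AND PROOFS =====

-- natural recursive reference: segment lengths with current open-segment length t
def segAux (t : Int) : List Int → List Int
  | [] => if t > 0 then [t] else []
  | b :: bs => if b == 1 then (t + 1) :: segAux 0 bs else segAux (t + 1) bs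

def idxF (s : Int) (bs : List Int) : List Int :=
  ((PySem.List.enumerate bs s).filter (fun p => p.2 == 1)).map (fun p => p.1)

def diffs (l : List Int) : List Int := (l.zip l.tail).map (fun p => p.2 - p.1)

-- the gap-form value of segAux, parametrised by the enumeration start s
def gapForm (s t : Int) (bs : List Int) : List Int :=
  match idxF s bs with
  | [] => if t + (bs.length : Int) > 0 then [t + (bs.length : Int)] else []
  | i0 :: r =>
    ((i0 - s + t + 1) :: diffs (i0 :: r)) ++
      (if (s + (bs.length : Int)) - ((i0 :: r).getLastD 0 + 1) > 0
       then [(s + (bs.length : Int)) - ((i0 :: r).getLastD 0 + 1)] else [])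

theorem idxF_cons (s b : Int) (bs : List Int) :
    idxF s (b :: bs) = (if b == 1 then [s] else []) ++ idxF (s + 1) bs := by
  simp [idxF, PySem.List.enumerate_cons]
  split_ifs with h <;> simp [h]

theorem ifseg_congr (c d x : Int) (h : c = d) :
    (if x + 1 < c then [c - (x + 1)] else []) = (if x + 1 < d then [d - (x + 1)] else []) := by
  rw [h]

theorem segAux_gapForm (bs : List Int) : ∀ (s t : Int), segAux t bs = gapForm s t bs := by
  induction bs with
  | nil =>
    intro s t
    simp [segAux, gapForm, idxF, PySem.List.enumerate]
  | cons b bs ih =>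
    intro s t
    unfold gapForm
    rw [idxF_cons]
    by_cases hb : b == 1
    · simp only [hb, if_pos]
      rcases h : idxF (s + 1) bs with _ | ⟨i0', r'⟩
      · have hx := ih (s + 1) 0
        unfold gapForm at hx
        rw [h] at hx
        simp only [List.length_cons]
        simp [segAux, hb, hx, diffs]
      · have hx := ih (s + 1) 0
        unfold gapForm at hx
        rw [h] at hx
        simp only [List.cons_append, List.nil_append, List.length_cons]
        simp [segAux, hb, hx, diffs]
        refine ⟨by ring, ?_⟩
        exact ifseg_congr _ _ _ (by ring)
    · simp only [hb, Bool.false_eq_true, if_neg, not_false_iff, List.nil_append]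
      have hx := ih (s + 1) (t + 1)
      unfold gapForm at hx
      have hs : segAux t (b :: bs) = segAux (t + 1) bs := by
        simp [segAux, hb]
      rw [hs, hx]
      rcases h : idxF (s + 1) bs with _ | ⟨i0', r'⟩ <;> simp only [List.length_cons]
      · have e : t + 1 + (bs.length : Int) = t + ((bs.length + 1 : Nat) : Int) := by push_cast; ring
        rw [e]
      · have e1 : i0' - (s + 1) + (t + 1) + 1 = i0' - s + t + 1 := by ring
        have e2 : s + 1 + (bs.length : Int) = s + ((bs.length + 1 : Nat) : Int) := by push_cast; ring
        rw [e1, e2]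

theorem alt_eq_segAux (bs : List Int) : boundaries_to_segments_py_alt bs = segAux 0 bs := by
  rw [segAux_gapForm bs 0 0]
  unfold boundaries_to_segments_py_alt gapForm idxF
  rcases h : ((PySem.List.enumerate bs 0).filter (fun p => p.2 == 1)).map (fun p => p.1)
    with _ | ⟨i0, r⟩ <;> simp only [h]
  · simp only [Int.zero_add]
    split_ifs <;> simp_all
  · simp only [diffs, Int.sub_zero, Int.zero_add, Int.add_zero]
    split_ifs <;> simp

theorem foldA (bs : List Int) : ∀ (segs : List Int) (t : Int),
    (let st := bs.foldl
        (fun (st : List Int × Int) b =>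
          let tmp := st.2 + 1
          if b == 1 then (st.1 ++ [tmp], 0) else (st.1, tmp))
        (segs, t)
      if st.2 > 0 then st.1 ++ [st.2] else st.1) = segs ++ segAux t bs := by
  induction bs with
  | nil =>
    intro segs t
    simp only [List.foldl_nil, segAux]
    split_ifs <;> simp
  | cons b bs ih =>
    intro segs t
    simp only [List.foldl_cons, segAux]
    by_cases hb : b == 1 <;> simp only [hb, if_pos, if_neg, Bool.false_eq_true, not_false_iff]
    · rw [ih (segs ++ [t + 1]) 0]
      simp
    · rw [ih segs (t + 1)]

theorem a_eq_segAux (bs : List Int) : boundaries_to_segments_py bs = segAux 0 bs := by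
  have := foldA bs [] 0
  simpa [boundaries_to_segments_py] using this

-- ===== VERDICT (by name: the statement is the Claim_ definition above) =====
theorem boundaries_to_segments_py_spec : Claim_equal_boundaries_to_segments_py := by
  intro bs _
  unfold Spec_boundaries_to_segments_py
  rw [a_eq_segAux, alt_eq_segAux]
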